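-- pv_equiv track=rewrite | github.com/yingzhuo1994/AlgoExpert | assessments/BuildFailures.py | binarySearchForFirstFalse
-- ===== SOURCE A (Python) =====
-- def binarySearchForFirstFalse(array):
--     leftIdx = 0
--     rightIdx = len(array) - 1
--
--     while leftIdx <= rightIdx:
--         middleIdx = (leftIdx + rightIdx) // 2
--         isFalse = not array[middleIdx]
--         if isFalse:
--             isFirstFalse = middleIdx == 0 or array[middleIdx - 1]
--             if isFirstFalse:
--                 return middleIdx
--             else:
--                 rightIdx = middleIdx - 1
--         else:
--             leftIdx = middleIdx + 1
--
--     return -1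
-- ===== SOURCE B (Python) =====
-- def binarySearchForFirstFalse(array):
--     def helper(lo, hi):
--         if hi < lo:
--             return -1
--         mid = (lo + hi) // 2
--         if array[mid]:
--             return helper(mid + 1, hi)
--         if mid == 0 or array[mid - 1]:
--             return mid
--         return helper(lo, mid - 1)
--     return helper(0, len(array) - 1)
-- ===== Notes on version B (the rewrite author's own statement) =====
-- stated objective: alternative
-- what changed: The iterative while-loop with two mutable bounds and an early return is re-decomposed as a recursive helper(lo, hi) with the true-branch tested first, preserving the exact mid computation and neighbour check.
import Mathlib
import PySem

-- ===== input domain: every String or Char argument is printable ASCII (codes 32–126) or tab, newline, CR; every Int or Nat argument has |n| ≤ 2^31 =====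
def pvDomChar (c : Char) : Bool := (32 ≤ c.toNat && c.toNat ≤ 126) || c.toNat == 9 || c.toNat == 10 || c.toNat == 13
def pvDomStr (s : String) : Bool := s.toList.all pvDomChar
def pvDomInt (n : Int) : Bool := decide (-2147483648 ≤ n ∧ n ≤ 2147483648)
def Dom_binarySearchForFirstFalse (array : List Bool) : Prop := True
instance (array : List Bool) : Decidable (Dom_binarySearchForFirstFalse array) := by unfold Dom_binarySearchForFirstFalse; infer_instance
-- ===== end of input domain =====

-- B rewrites A's while-loop with mutable bounds as a recursive helper with the true-branch first (alternative decomposition, same values).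

-- ===== PORT A =====
-- the while-loop of A, as structural recursion on the shrinking interval
def bsffA_loop (array : List Bool) (leftIdx rightIdx : Int) : Int :=
  if h : leftIdx ≤ rightIdx then
    let middleIdx := PySem.Int.floordiv (leftIdx + rightIdx) 2
    let isFalse := !((PySem.List.pyGet? array middleIdx).getD false)
    if isFalse then
      let isFirstFalse := middleIdx == 0 || (PySem.List.pyGet? array (middleIdx - 1)).getD false
      if isFirstFalse then middleIdx
      else bsffA_loop array leftIdx (middleIdx - 1)
    else bsffA_loop array (middleIdx + 1) rightIdx
  else -1
termination_by (rightIdx + 1 - leftIdx).toNat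
decreasing_by
  · have := PySem.Int.floordiv_two_mid_bounds h; omega
  · have := PySem.Int.floordiv_two_mid_bounds h; omega

def binarySearchForFirstFalse (array : List Bool) : Int :=
  bsffA_loop array 0 ((array.length : Int) - 1)

-- ===== PORT B =====
def bsffB_helper (array : List Bool) (lo hi : Int) : Int :=
  if h : hi < lo then -1
  else
    let mid := PySem.Int.floordiv (lo + hi) 2
    if (PySem.List.pyGet? array mid).getD false then
      bsffB_helper array (mid + 1) hi
    else if mid == 0 || (PySem.List.pyGet? array (mid - 1)).getD false then
      mid
    else
      bsffB_helper array lo (mid - 1)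
termination_by (hi + 1 - lo).toNat
decreasing_by
  · have := PySem.Int.floordiv_two_mid_bounds (show lo ≤ hi by omega); omega
  · have := PySem.Int.floordiv_two_mid_bounds (show lo ≤ hi by omega); omega

def binarySearchForFirstFalse_alt (array : List Bool) : Int :=
  bsffB_helper array 0 ((array.length : Int) - 1)

-- ===== PRECONDITION & SPEC =====
def Spec_binarySearchForFirstFalse (array : List Bool) (out : Int) : Prop := out = binarySearchForFirstFalse_alt array
instance (array : List Bool) (out : Int) : Decidable (Spec_binarySearchForFirstFalse array out) := by unfold Spec_binarySearchForFirstFalse; infer_instance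

-- ===== CLAIM (what is proved, stated in full; the proofs are below) =====
def Claim_equal_binarySearchForFirstFalse : Prop := ∀ (array : List Bool), Dom_binarySearchForFirstFalse array → Spec_binarySearchForFirstFalse array (binarySearchForFirstFalse array)

-- ===== LEMMAS AND PROOFS =====
theorem bsff_loop_eq_helper (array : List Bool) (l r : Int) :
    bsffA_loop array l r = bsffB_helper array l r := by
  fun_induction bsffA_loop array l r with
  | case1 l r h mid isF hFF hFirst hft =>
    rw [bsffB_helper, dif_neg (not_lt.mpr h)]
    have hdiv : PySem.Int.floordiv (l + r) 2 = (l + r) / 2 :=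
      PySem.Int.floordiv_eq_ediv_of_pos (by norm_num)
    simp only [mid, isF, hFirst, hdiv, Bool.not_eq_true'] at hFF hft ⊢
    simp [hFF]
    intro h1 h2
    rcases Bool.or_eq_true_iff.mp hft with hx | hx
    · exact absurd (by exact_mod_cast beq_iff_eq.mp hx) h1
    · simp [h2] at hx
  | case2 l r h mid isF hFF hFirst hft ih =>
    rw [bsffB_helper, dif_neg (not_lt.mpr h)]
    have hdiv : PySem.Int.floordiv (l + r) 2 = (l + r) / 2 :=
      PySem.Int.floordiv_eq_ediv_of_pos (by norm_num)
    simp only [mid, isF, hFirst, hdiv, Bool.not_eq_true'] at hFF hft ih ⊢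
    rw [if_neg (by simp [hFF]), if_neg hft]
    exact ih
  | case3 l r h mid isF hFF ih =>
    rw [bsffB_helper, dif_neg (not_lt.mpr h)]
    have hdiv : PySem.Int.floordiv (l + r) 2 = (l + r) / 2 :=
      PySem.Int.floordiv_eq_ediv_of_pos (by norm_num)
    simp only [mid, isF, hdiv] at hFF ih ⊢
    have hg : (PySem.List.pyGet? array ((l + r) / 2)).getD false = true := by
      simpa using hFF
    rw [if_pos hg]
    exact ih
  | case4 l r h =>
    rw [bsffB_helper, dif_pos (by omega)]

-- ===== VERDICT (by name: the statement is the Claim_ definition above) =====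
theorem binarySearchForFirstFalse_spec : Claim_equal_binarySearchForFirstFalse := by
  intro array _
  unfold Spec_binarySearchForFirstFalse binarySearchForFirstFalse binarySearchForFirstFalse_alt
  exact bsff_loop_eq_helper array 0 ((array.length : Int) - 1)
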